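-- pv_equiv track=rewrite | github.com/zhbngchen/USACO | training/2.2/runround/runround.py | checkRunRound
-- ===== SOURCE A (Python) =====
-- def checkRunRound(value):
--   strVal = str(value)
--   listVal = []
--   for d in strVal:
--     listVal.append(int(d))
--   lenListVal = len(listVal)
--   counts = [0] * lenListVal
--
--   index = 0
--   while counts[index] == 0:
--     counts[index] = 1
--     index += listVal[index]
--     if index >= lenListVal:
--       index = index % lenListVal
--
--   if index == 0:
--     found = True
--     for count in counts:
--       if count == 0:
--         found = False
--         break
--     return found
--   else:
--     return False
-- ===== SOURCE B (Python) =====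
-- def checkRunRound(value):
--   digits = [int(c) for c in str(value)]
--   n = len(digits)
--   orbit = [0]
--   last = 0
--   for _ in range(n - 1):
--     last = (last + digits[last]) % n
--     orbit.append(last)
--   return sorted(orbit) == list(range(n)) and (last + digits[last]) % n == 0
-- ===== Notes on version B (the rewrite author's own statement) =====
-- stated objective: alternative
-- what changed: B unconditionally generates the list of the first n jump positions (no marking, no early exit), then decides the answer by a sort-based permutation test sorted(orbit)==list(range(n)) plus one final jump-back-to-zero test, replacing A's online revisit detection with a counts array and its final all-marked scan.
import Mathlib
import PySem

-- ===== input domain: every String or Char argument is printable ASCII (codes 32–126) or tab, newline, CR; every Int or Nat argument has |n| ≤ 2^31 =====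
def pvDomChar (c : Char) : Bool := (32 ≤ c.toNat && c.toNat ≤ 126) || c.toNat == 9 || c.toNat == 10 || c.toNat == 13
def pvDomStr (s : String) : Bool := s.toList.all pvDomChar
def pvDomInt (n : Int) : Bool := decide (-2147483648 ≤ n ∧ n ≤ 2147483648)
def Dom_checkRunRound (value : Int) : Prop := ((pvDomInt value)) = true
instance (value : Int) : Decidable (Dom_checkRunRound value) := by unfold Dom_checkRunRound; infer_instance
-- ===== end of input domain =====

-- B drops A's online cycle detection entirely: it unconditionally generates the first n jump
-- positions and decides by a sort-based permutation test plus one final jump-back-to-zero test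
-- (objective: alternative); equal return values on every non-negative value (A raises ValueError
-- on negative input, excluded by Pre_).

-- ===== PORT A =====
-- int(d) for one character d: exact on digit characters '0'..'9'; any other character makes
-- Python raise ValueError, and all such inputs are excluded by Pre_checkRunRound.
def pyDigit (c : Char) : Int := ((c.toNat - 48 : Nat) : Int)

-- the 'while counts[index] == 0' loop of A; fuel makes the same computation total
-- (each loop body turns one 0 of counts into 1, so fuel = len(counts)+1 is never exhausted
-- on the inputs Pre_ admits).
def loopA (listVal : List Int) : Nat → List Int → Int → Int × List Int
  | 0, counts, index => (index, counts)
  | fuel+1, counts, index =>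
    if PySem.List.pyGetD counts index 1 = 0 then
      let counts' := PySem.List.pySetD counts index 1
      let index' := index + PySem.List.pyGetD listVal index 0
      let index'' := if PySem.List.len listVal ≤ index' then
          PySem.Int.mod index' (PySem.List.len listVal) else index'
      loopA listVal fuel counts' index''
    else (index, counts)

def checkRunRound (value : Int) : Bool :=
  let listVal := (PySem.Int.toChars value).map pyDigit
  let counts := List.replicate listVal.length (0 : Int)
  let r := loopA listVal (listVal.length + 1) counts 0
  if r.1 = 0 then r.2.all (fun c => c != 0) else false

-- ===== PORT B =====
-- the 'for _ in range(n - 1)' loop of B: carries (orbit, last), appends one jump per iteration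
def buildB (digits : List Int) (n : Int) : Nat → List Int × Int → List Int × Int
  | 0, st => st
  | k+1, st =>
    let nxt := PySem.Int.mod (st.2 + PySem.List.pyGetD digits st.2 0) n
    buildB digits n k (st.1 ++ [nxt], nxt)

def checkRunRound_alt (value : Int) : Bool :=
  let digits := (PySem.Int.toChars value).map pyDigit
  let n : Int := PySem.List.len digits
  let r := buildB digits n (digits.length - 1) ([0], 0)
  (PySem.List.sorted r.1 (fun x => x) false == PySem.List.pyRange 0 n 1)
    && (PySem.Int.mod (r.2 + PySem.List.pyGetD digits r.2 0) n == 0)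

-- ===== PRECONDITION & SPEC =====
-- Pre_ excludes exactly the negative values: there str(value) starts with '-' and both A and B
-- raise ValueError at int('-').
def Pre_checkRunRound (value : Int) : Prop := 0 ≤ value
instance (value : Int) : Decidable (Pre_checkRunRound value) := by unfold Pre_checkRunRound; infer_instance
def pvWitness_checkRunRound : Int := 81362

def Spec_checkRunRound (value : Int) (out : Bool) : Prop := out = checkRunRound_alt value
instance (value : Int) (out : Bool) : Decidable (Spec_checkRunRound value out) := by unfold Spec_checkRunRound; infer_instance

-- ===== CLAIM (what is proved, stated in full; the proofs are below) =====
def Claim_equal_checkRunRound : Prop := ∀ (value : Int), Dom_checkRunRound value → Pre_checkRunRound value → Spec_checkRunRound value (checkRunRound value)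

-- ===== LEMMAS AND PROOFS =====

-- proof-side abbreviations: the jump function and the list of its first k iterates
def stepF (digits : List Int) (i : Int) : Int :=
  PySem.Int.mod (i + PySem.List.pyGetD digits i 0) (digits.length : Int)

def iterL (digits : List Int) : Nat → Int → List Int
  | 0, _ => []
  | k+1, i => i :: iterL digits k (stepF digits i)

-- proof-side helper: B's previous-formulation loop (visited-set simulation), used only as a
-- bridge between A's counts loop and B's orbit list
def goB (digits : List Int) (n : Int) : Nat → PySem.Set Int → Int → Bool
  | 0, _, idx => idx == 0
  | k+1, visited, idx =>
    if PySem.Set.contains visited idx then false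
    else goB digits n k (PySem.Set.add visited idx)
           (PySem.Int.mod (idx + PySem.List.pyGetD digits idx 0) n)

theorem toDigitsCore_len_le (f : Nat) : ∀ (n : Nat) (ds : List Char),
    ds.length ≤ (Nat.toDigitsCore 10 f n ds).length := by
  induction f with
  | zero => intro n ds; simp [Nat.toDigitsCore]
  | succ f ih =>
    intro n ds
    simp only [Nat.toDigitsCore]
    split
    · simp
    · exact le_trans (by simp) (ih (n / 10) _)

theorem toDigits_ne_nil (n : Nat) : Nat.toDigits 10 n ≠ [] := by
  simp only [Nat.toDigits, Nat.toDigitsCore]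
  split
  · simp
  · intro h
    have := toDigitsCore_len_le n (n / 10) [(n % 10).digitChar]
    rw [h] at this
    simp at this

theorem toChars_ne_nil (v : Int) : (PySem.Int.toChars v).map pyDigit ≠ [] := by
  simp only [PySem.Int.toChars]
  split
  · simp
  · simp [toDigits_ne_nil]

-- one zero of counts flipped to 1: the number of zeros drops by one
theorem count_zero_set (counts : List Int) (j : Nat) (hj : j < counts.length)
    (h0 : counts.getD j 0 = 0) :
    (counts.set j 1).count 0 + 1 = counts.count 0 := by
  induction counts generalizing j with
  | nil => simp at hj
  | cons c cs ih =>
    cases j with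
    | zero =>
      simp only [List.getD_cons_zero] at h0
      subst h0
      simp
    | succ j =>
      simp only [List.getD_cons_succ] at h0
      simp only [List.length_cons, Nat.succ_lt_succ_iff] at hj
      simp only [List.set_cons_succ, List.count_cons]
      have := ih j hj h0
      omega

theorem getD_set_eq (l : List Int) (i j : Nat) (v : Int) (hj : j < l.length) :
    (l.set i v).getD j 0 = if i = j then v else l.getD j 0 := by
  rw [List.getD_eq_getElem _ _ (by simpa using hj), List.getElem_set,
      List.getD_eq_getElem _ _ hj]

-- the A-side invariant: A's loop followed by A's final check equals the visited-set countdown,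
-- when visited is exactly the set of indices already marked in counts and k counts the zeros.
theorem loop_equiv (digits : List Int) (hd : ∀ d ∈ digits, 0 ≤ d) :
    ∀ (k : Nat) (f : Nat) (counts : List Int) (visited : PySem.Set Int) (idx : Int),
    counts.length = digits.length →
    (∀ i : Nat, i < digits.length → (counts.getD i 0 = 0 ∨ counts.getD i 0 = 1)) →
    (∀ i : Nat, i < digits.length → (counts.getD i 0 = 1 ↔ (i : Int) ∈ visited)) →
    k = counts.count 0 →
    0 ≤ idx → idx < (digits.length : Int) →
    k < f →
    (if (loopA digits f counts idx).1 = 0 then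
        (loopA digits f counts idx).2.all (fun c => c != 0) else false)
      = goB digits (digits.length : Int) k visited idx := by
  intro k
  induction k with
  | zero =>
    intro f counts visited idx hlen hv hmem hcnt h0 hub hf
    obtain ⟨f, rfl⟩ : ∃ f', f = f' + 1 := ⟨f - 1, by omega⟩
    have hidx : idx.toNat < counts.length := by omega
    have hget : PySem.List.pyGetD counts idx 1 = counts.getD idx.toNat 0 := by
      rw [PySem.List.pyGetD_eq_getElem counts 1 h0 (by rw [hlen]; exact hub),
          List.getD_eq_getElem _ _ hidx]
    have hne : counts.getD idx.toNat 0 ≠ 0 := by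
      intro h
      have : (0 : Int) ∈ counts := by
        rw [← h, List.getD_eq_getElem _ _ hidx]; exact List.getElem_mem hidx
      rw [← List.count_pos_iff] at this
      omega
    have hall : counts.all (fun c => c != 0) = true := by
      rw [List.all_eq_true]
      intro c hc
      have : c ≠ 0 := by
        intro h; subst h
        rw [← List.count_pos_iff] at hc; omega
      simpa using this
    simp only [loopA, hget, if_neg hne, goB, hall]
    by_cases h : idx = 0 <;> simp [h]
  | succ k ih =>
    intro f counts visited idx hlen hv hmem hcnt h0 hub hf
    obtain ⟨f, rfl⟩ : ∃ f', f = f' + 1 := ⟨f - 1, by omega⟩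
    have hn : (0 : Int) < digits.length := by omega
    have hidx : idx.toNat < counts.length := by omega
    have hidx' : ((idx.toNat : Int)) = idx := by omega
    have hget : PySem.List.pyGetD counts idx 1 = counts.getD idx.toNat 0 := by
      rw [PySem.List.pyGetD_eq_getElem counts 1 h0 (by rw [hlen]; exact hub),
          List.getD_eq_getElem _ _ hidx]
    rcases hv idx.toNat (by omega) with hz | ho
    · -- counts[idx] = 0 : idx not yet visited, both loops take one more step
      have hnotmem : idx ∉ visited := by
        intro h
        have := (hmem idx.toNat (by omega)).2 (by rwa [hidx'])
        omega
      have hcontains : PySem.Set.contains visited idx = false := by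
        rw [← Bool.not_eq_true, PySem.Set.contains_iff]; exact hnotmem
      have hdig : 0 ≤ PySem.List.pyGetD digits idx 0 := by
        apply hd
        rw [PySem.List.pyGetD_eq_getElem digits 0 h0 hub]
        exact List.getElem_mem _
      have hsetD : PySem.List.pySetD counts idx 1 = counts.set idx.toNat 1 :=
        PySem.List.pySetD_of_nonneg counts 1 h0
      have hstep : (if PySem.List.len digits ≤ idx + PySem.List.pyGetD digits idx 0 then
            PySem.Int.mod (idx + PySem.List.pyGetD digits idx 0) (PySem.List.len digits)
          else idx + PySem.List.pyGetD digits idx 0)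
          = PySem.Int.mod (idx + PySem.List.pyGetD digits idx 0) (digits.length : Int) := by
        simp only [PySem.List.len_eq]
        split
        · rfl
        · rw [PySem.Int.mod_eq_emod_of_pos hn, Int.emod_eq_of_lt (by omega) (by omega)]
      simp only [loopA, hget, if_pos hz, hsetD, hstep, goB, hcontains, Bool.false_eq_true,
        if_false]
      apply ih
      · simpa using hlen
      · intro i hi
        rw [getD_set_eq _ _ _ _ (by omega)]
        split
        · right; rfl
        · exact hv i hi
      · intro i hi
        rw [getD_set_eq _ _ _ _ (by omega), PySem.Set.mem_add]
        rcases eq_or_ne idx.toNat i with he | hne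
        · subst he
          rw [if_pos rfl]
          simp only [hidx']
          simp
        · rw [if_neg hne, hmem i hi]
          constructor
          · exact Or.inl
          · rintro (h | h)
            · exact h
            · exfalso; apply hne; omega
      · have := count_zero_set counts idx.toNat hidx hz
        omega
      · exact PySem.Int.mod_nonneg _ hn
      · exact PySem.Int.mod_lt _ hn
      · omega
    · -- counts[idx] = 1 : A's loop stops with zeros left, the countdown sees a revisit: false
      have hmem' : idx ∈ visited := by
        have := (hmem idx.toNat (by omega)).1 ho
        rwa [hidx'] at this
      have hcontains : PySem.Set.contains visited idx = true := by
        rw [PySem.Set.contains_iff]; exact hmem'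
      have hallf : counts.all (fun c => c != 0) = false := by
        rw [List.all_eq_false]
        refine ⟨0, ?_, by simp⟩
        rw [← List.count_pos_iff]; omega
      simp only [loopA, hget, if_neg (by omega : ¬ counts.getD idx.toNat 0 = 0), goB,
        hcontains, if_true]
      split <;> simp [hallf]

-- the visited-set countdown decided by the iterate list: it returns false iff the next k
-- iterates revisit visited or repeat among themselves, else tests the k-th iterate against 0
theorem goB_eq_iter (digits : List Int) : ∀ (k : Nat) (visited : PySem.Set Int) (idx : Int),
    goB digits (digits.length : Int) k visited idx =
      if (iterL digits k idx).Nodup ∧ ∀ x ∈ iterL digits k idx, x ∉ visited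
      then ((stepF digits)^[k] idx == 0) else false := by
  intro k
  induction k with
  | zero => intro visited idx; simp [goB, iterL]
  | succ k ih =>
    intro visited idx
    by_cases hmem : idx ∈ visited
    · have hc : PySem.Set.contains visited idx = true := by
        rw [PySem.Set.contains_iff]; exact hmem
      rw [goB, if_pos hc, if_neg]
      rintro ⟨-, hall⟩
      exact hall idx (by simp [iterL]) hmem
    · have hc : PySem.Set.contains visited idx = false := by
        rw [← Bool.not_eq_true, PySem.Set.contains_iff]; exact hmem
      rw [goB, hc]
      simp only [Bool.false_eq_true, if_false]
      have hstep : PySem.Int.mod (idx + PySem.List.pyGetD digits idx 0) (digits.length : Int)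
          = stepF digits idx := rfl
      rw [hstep, ih]
      have hcond : ((iterL digits k (stepF digits idx)).Nodup ∧
            ∀ x ∈ iterL digits k (stepF digits idx), x ∉ PySem.Set.add visited idx) ↔
          ((iterL digits (k+1) idx).Nodup ∧ ∀ x ∈ iterL digits (k+1) idx, x ∉ visited) := by
        simp only [iterL, List.nodup_cons, PySem.Set.mem_add, List.mem_cons]
        constructor
        · rintro ⟨hnd, hall⟩
          refine ⟨⟨fun h => (hall idx h) (Or.inr rfl), hnd⟩, ?_⟩
          rintro x (rfl | hx)
          · exact hmem
          · exact fun hv => (hall x hx) (Or.inl hv)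
        · rintro ⟨⟨hni, hnd⟩, hall⟩
          refine ⟨hnd, fun x hx => ?_⟩
          rintro (hv | rfl)
          · exact hall x (Or.inr hx) hv
          · exact hni hx
      rw [if_congr hcond rfl rfl, Function.iterate_succ_apply]

theorem length_iterL (digits : List Int) : ∀ (k : Nat) (i : Int),
    (iterL digits k i).length = k := by
  intro k
  induction k with
  | zero => intro i; rfl
  | succ k ih => intro i; simp [iterL, ih]

theorem mem_iterL_range (digits : List Int) (hn : (0 : Int) < digits.length) :
    ∀ (k : Nat) (i : Int), 0 ≤ i → i < (digits.length : Int) →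
    ∀ x ∈ iterL digits k i, 0 ≤ x ∧ x < (digits.length : Int) := by
  intro k
  induction k with
  | zero => intro i _ _ x hx; simp [iterL] at hx
  | succ k ih =>
    intro i h0 hub x hx
    rcases List.mem_cons.1 hx with rfl | hx
    · exact ⟨h0, hub⟩
    · exact ih (stepF digits i) (PySem.Int.mod_nonneg _ hn) (PySem.Int.mod_lt _ hn) x hx

-- B's builder loop produces exactly acc followed by the iterates of step(last)
theorem buildB_eq (digits : List Int) : ∀ (k : Nat) (acc : List Int) (last : Int),
    buildB digits (digits.length : Int) k (acc, last)
      = (acc ++ iterL digits k (stepF digits last), (stepF digits)^[k] last) := by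
  intro k
  induction k with
  | zero => intro acc last; simp [buildB, iterL]
  | succ k ih =>
    intro acc last
    show buildB digits (digits.length : Int) k
        (acc ++ [stepF digits last], stepF digits last) = _
    rw [ih]
    simp [iterL, Function.iterate_succ_apply]

-- sorted(orbit) == range(n) names exactly distinctness, for n in-range values
theorem sorted_eq_range_iff_nodup (orbit : List Int) (n : Nat)
    (hlen : orbit.length = n)
    (hmem : ∀ x ∈ orbit, 0 ≤ x ∧ x < (n : Int)) :
    PySem.List.sorted orbit (fun x => x) false = PySem.List.pyRange 0 (n : Int) 1 ↔
      orbit.Nodup := by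
  constructor
  · intro h
    have hperm : (PySem.List.pyRange 0 (n : Int) 1).Perm orbit := by
      rw [← h]; exact PySem.List.sorted_perm orbit (fun x => x) false
    exact hperm.nodup (PySem.List.nodup_pyRange_one 0 (n : Int))
  · intro hnd
    have hsub : orbit ⊆ PySem.List.pyRange 0 (n : Int) 1 := by
      intro x hx
      rw [PySem.List.mem_pyRange_one]
      exact ⟨(hmem x hx).1, by simpa using (hmem x hx).2⟩
    have hsp : List.Subperm orbit (PySem.List.pyRange 0 (n : Int) 1) := hnd.subperm hsub
    have hlr : (PySem.List.pyRange 0 (n : Int) 1).length ≤ orbit.length := by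
      rw [PySem.List.length_pyRange_one, hlen]; omega
    have hperm : (PySem.List.pyRange 0 (n : Int) 1).Perm orbit :=
      (hsp.perm_of_length_le hlr).symm
    exact PySem.List.sorted_eq_of_perm_of_pairwise_lt orbit
      (PySem.List.pyRange 0 (n : Int) 1) (fun x => x) hperm
      (PySem.List.pairwise_lt_pyRange_one 0 (n : Int))

-- ===== VERDICT (by name: the statement is the Claim_ definition above) =====
theorem checkRunRound_spec : Claim_equal_checkRunRound := by
  intro value _ hpre
  unfold Spec_checkRunRound checkRunRound checkRunRound_alt
  simp only [PySem.List.len_eq]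
  set digits := (PySem.Int.toChars value).map pyDigit with hdig
  have hne : digits ≠ [] := toChars_ne_nil value
  have hn : 0 < digits.length := List.length_pos_iff.2 hne
  have hnI : (0 : Int) < (digits.length : Int) := by exact_mod_cast hn
  -- digit values are non-negative (pyDigit maps into Nat casts)
  have hd : ∀ d ∈ digits, 0 ≤ d := by
    intro d hd
    rw [hdig] at hd
    simp only [List.mem_map] at hd
    obtain ⟨c, _, rfl⟩ := hd
    simp [pyDigit]
  -- A's side equals the visited-set countdown
  rw [loop_equiv digits hd digits.length (digits.length + 1)
      (List.replicate digits.length 0) PySem.Set.empty 0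
      (by simp)
      (fun i hi => Or.inl (List.getD_replicate 0 hi))
      (fun i hi => by simp [PySem.Set.empty])
      (by simp [List.count_replicate_self])
      le_rfl hnI (by omega)]
  -- the countdown in terms of the iterate list
  rw [goB_eq_iter digits digits.length PySem.Set.empty 0]
  -- B's side: the builder produces the iterate list
  have horbit : buildB digits (digits.length : Int) (digits.length - 1) ([0], 0)
      = (iterL digits digits.length 0, (stepF digits)^[digits.length - 1] 0) := by
    rw [buildB_eq]
    congr 1
    obtain ⟨m, hm⟩ : ∃ m, digits.length = m + 1 := ⟨digits.length - 1, by omega⟩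
    rw [hm]
    simp [iterL]
  rw [horbit]
  have hnodup_iff := sorted_eq_range_iff_nodup (iterL digits digits.length 0) digits.length
      (length_iterL digits digits.length 0)
      (mem_iterL_range digits hnI digits.length 0 le_rfl hnI)
  have hlast : stepF digits ((stepF digits)^[digits.length - 1] 0)
      = (stepF digits)^[digits.length] 0 := by
    conv_rhs => rw [show digits.length = (digits.length - 1) + 1 by omega]
    rw [Function.iterate_succ_apply']
  have hstep2 : PySem.Int.mod ((stepF digits)^[digits.length - 1] 0
        + PySem.List.pyGetD digits ((stepF digits)^[digits.length - 1] 0) 0)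
        (digits.length : Int) = stepF digits ((stepF digits)^[digits.length - 1] 0) := rfl
  rw [hstep2, hlast]
  by_cases hnd : (iterL digits digits.length 0).Nodup
  · rw [if_pos ⟨hnd, by simp [PySem.Set.empty]⟩]
    have : (PySem.List.sorted (iterL digits digits.length 0) (fun x => x) false
        == PySem.List.pyRange 0 (digits.length : Int) 1) = true := by
      rw [beq_iff_eq]; exact hnodup_iff.2 hnd
    rw [this, Bool.true_and]
  · rw [if_neg (fun h => hnd h.1)]
    have : (PySem.List.sorted (iterL digits digits.length 0) (fun x => x) false
        == PySem.List.pyRange 0 (digits.length : Int) 1) = false := by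
      rw [← Bool.not_eq_true, beq_iff_eq]
      exact fun h => hnd (hnodup_iff.1 h)
    rw [this, Bool.false_and]
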